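-- pv_equiv track=rewrite | github.com/noaione/vthell | scripts/vthell.py | find_res
-- ===== SOURCE A (Python) =====
-- def find_res(line: str):
--     """Find video resolution"""
--     lines = [
--         l.rstrip()
--         for l in line.split()
--         if not l.startswith("(") and not l.endswith(")")
--     ]
--     lines = [l for l in lines if not l.startswith("[") and not l.endswith("]")]
--     res = None
--     for l in lines:
--         if l.endswith("p"):
--             res = l
--             break
--     return res
-- ===== SOURCE B (Python) =====
-- def find_res(line: str):
--     """Find video resolution: single character-level scan, no split(), no token lists."""
--     def is_res(tok):
--         return bool(tok) and tok[0] not in "([" and tok[-1] == "p"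
--
--     token = ""
--     for ch in line:
--         if ch.isspace():
--             if is_res(token):
--                 return token
--             token = ""
--         else:
--             token += ch
--     if is_res(token):
--         return token
--     return None
-- ===== Notes on version B (the rewrite author's own statement) =====
-- stated objective: alternative
-- what changed: Replaced split() plus two intermediate filtered token lists plus a find-loop by a single character-level scan that maintains one running token buffer and tests a candidate's first/last character when the token ends; no token list is ever materialized.
import Mathlib
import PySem

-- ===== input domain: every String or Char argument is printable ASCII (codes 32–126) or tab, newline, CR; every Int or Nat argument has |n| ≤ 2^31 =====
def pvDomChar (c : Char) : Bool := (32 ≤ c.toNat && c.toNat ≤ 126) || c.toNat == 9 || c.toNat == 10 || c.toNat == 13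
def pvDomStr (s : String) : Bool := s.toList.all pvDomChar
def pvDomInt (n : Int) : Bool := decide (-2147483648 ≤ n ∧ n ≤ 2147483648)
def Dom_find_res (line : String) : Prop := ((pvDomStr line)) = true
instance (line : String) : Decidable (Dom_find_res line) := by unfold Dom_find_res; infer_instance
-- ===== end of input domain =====

-- B replaces A's split() + two filtered token lists + find-loop by a single character-level
-- scan maintaining one token buffer (alternative decomposition; same O(n) cost).

-- ===== PORT A =====
-- the 'for l in lines: if l.endswith("p"): res = l; break' loop
def findLoopA : List String → Option String
  | [] => none
  | l :: rest => if PySem.Str.endswith l "p" then some l else findLoopA rest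

def find_res (line : String) : Option String :=
  let lines1 := ((PySem.Str.split₀ line).filter
      (fun l => !(PySem.Str.startswith l "(") && !(PySem.Str.endswith l ")"))).map PySem.Str.rstrip
  let lines2 := lines1.filter (fun l => !(PySem.Str.startswith l "[") && !(PySem.Str.endswith l "]"))
  findLoopA lines2

-- ===== PORT B =====
-- 'bool(tok) and tok[0] not in "([" and tok[-1] == "p"'; the indexings are total
-- here because they are guarded by the non-emptiness test, so headD/getLastD are exact
def isResB (t : List Char) : Bool :=
  !t.isEmpty && !(t.headD ' ' == '(' || t.headD ' ' == '[') && (t.getLastD ' ' == 'p')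

-- the 'for ch in line' loop with the running token buffer, plus the final flush
def scanCharsB : List Char → List Char → Option String
  | [], cur => if isResB cur then some (String.ofList cur) else none
  | c :: rest, cur =>
    if PySem.Chars.isspace c then
      if isResB cur then some (String.ofList cur) else scanCharsB rest []
    else scanCharsB rest (cur ++ [c])

def find_res_alt (line : String) : Option String := scanCharsB line.toList []

-- ===== PRECONDITION & SPEC =====
def Spec_find_res (line : String) (out : Option String) : Prop := out = find_res_alt line
instance (line : String) (out : Option String) : Decidable (Spec_find_res line out) := by unfold Spec_find_res; infer_instance

-- ===== CLAIM =====
def Claim_equal_find_res : Prop := ∀ (line : String), Dom_find_res line → Spec_find_res line (find_res line)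

-- ===== LEMMAS AND PROOFS =====

-- proof-side intermediary: A's three token passes fused into one token-level scan
def scanTok : List String → Option String
  | [] => none
  | t :: rest =>
    if PySem.Str.startswith t "(" || PySem.Str.endswith t ")" ||
       PySem.Str.startswith t "[" || PySem.Str.endswith t "]" then scanTok rest
    else if PySem.Str.endswith t "p" then some t else scanTok rest

-- every token emitted by Chars.split₀ contains no whitespace characters
lemma split₀_go_no_space (s cur : List Char) (acc : List (List Char))
    (hcur : ∀ c ∈ cur, PySem.Chars.isspace c = false)
    (hacc : ∀ t ∈ acc, ∀ c ∈ t, PySem.Chars.isspace c = false) :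
    ∀ t ∈ PySem.Chars.split₀.go s cur acc, ∀ c ∈ t, PySem.Chars.isspace c = false := by
  induction s generalizing cur acc with
  | nil =>
    intro t ht
    simp only [PySem.Chars.split₀.go] at ht
    split at ht
    · exact hacc t (by simpa using ht)
    · rcases (by simpa using ht : t ∈ acc ∨ t = cur.reverse) with h | h
      · exact hacc t h
      · subst h; intro c hc; exact hcur c (by simpa using hc)
  | cons c rest ih =>
    intro t ht
    simp only [PySem.Chars.split₀.go] at ht
    split at ht
    · split at ht
      · exact ih [] acc (by simp) hacc t ht
      · refine ih [] (cur.reverse :: acc) (by simp) ?_ t ht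
        intro u hu
        rcases List.mem_cons.mp hu with hu | hu
        · subst hu; intro d hd; exact hcur d (by simpa using hd)
        · exact hacc u hu
    · rename_i hcsp
      refine ih (c :: cur) acc ?_ hacc t ht
      intro d hd
      rcases List.mem_cons.mp hd with hd | hd
      · simp_all
      · exact hcur d hd

lemma split₀_no_space (s : List Char) :
    ∀ t ∈ PySem.Chars.split₀ s, ∀ c ∈ t, PySem.Chars.isspace c = false := by
  intro t ht
  exact split₀_go_no_space s [] [] (by simp) (by simp) t ht

-- rstrip is a no-op on a whitespace-free token
lemma rstrip_fixed (t : List Char) (h : ∀ c ∈ t, PySem.Chars.isspace c = false) :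
    PySem.Chars.rstrip t = t := by
  unfold PySem.Chars.rstrip
  rw [List.dropWhile_eq_self_iff.mpr, List.reverse_reverse]
  intro hl
  simp only [List.length_reverse] at hl
  have hm : t[t.length - 1] ∈ t := List.getElem_mem (by omega)
  simp [h _ hm]

lemma str_rstrip_fixed (t : String) (ht : ∀ c ∈ t.toList, PySem.Chars.isspace c = false) :
    PySem.Str.rstrip t = t := by
  unfold PySem.Str.rstrip
  rw [rstrip_fixed t.toList ht]
  simp

-- A's three passes collapse to the fused token-level scan on any rstrip-fixed token list
lemma passes_eq_scan (ts : List String) (h : ∀ t ∈ ts, PySem.Str.rstrip t = t) :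
    findLoopA (((ts.filter
        (fun l => !(PySem.Str.startswith l "(") && !(PySem.Str.endswith l ")"))).map PySem.Str.rstrip).filter
        (fun l => !(PySem.Str.startswith l "[") && !(PySem.Str.endswith l "]"))) = scanTok ts := by
  induction ts with
  | nil => rfl
  | cons t ts ih =>
    have hfix : PySem.Str.rstrip t = t := h t (by simp)
    have hrest : ∀ u ∈ ts, PySem.Str.rstrip u = u := fun u hu => h u (List.mem_cons_of_mem _ hu)
    by_cases h1 : (!(PySem.Str.startswith t "(") && !(PySem.Str.endswith t ")")) = true
    · simp only [List.filter_cons, h1, if_true, List.map_cons, hfix]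
      by_cases h2 : (!(PySem.Str.startswith t "[") && !(PySem.Str.endswith t "]")) = true
      · simp only [List.filter_cons, h2, if_true]
        simp only [Bool.and_eq_true, Bool.not_eq_true', PySem.Str.startswith_eq,
          PySem.Str.endswith_eq,
          show "(".toList = ['('] from rfl, show ")".toList = [')'] from rfl,
          show "[".toList = ['['] from rfl, show "]".toList = [']'] from rfl] at h1 h2
        by_cases hp : PySem.Chars.endswith t.toList ['p'] = true
        · simp [scanTok, findLoopA, h1.1, h1.2, h2.1, h2.2, hp]
        · simp only [Bool.not_eq_true] at hp
          simpa [scanTok, findLoopA, h1.1, h1.2, h2.1, h2.2, hp] using ih hrest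
      · rw [if_neg h2]
        simp only [Bool.and_eq_true, Bool.not_eq_true', PySem.Str.startswith_eq,
          PySem.Str.endswith_eq,
          show "(".toList = ['('] from rfl, show ")".toList = [')'] from rfl,
          show "[".toList = ['['] from rfl, show "]".toList = [']'] from rfl] at h1
        simp only [Bool.and_eq_true, Bool.not_eq_true', not_and_or, Bool.not_eq_false,
          PySem.Str.startswith_eq, PySem.Str.endswith_eq,
          show "(".toList = ['('] from rfl, show ")".toList = [')'] from rfl,
          show "[".toList = ['['] from rfl, show "]".toList = [']'] from rfl] at h2
        rcases h2 with h2 | h2 <;>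
          simpa [scanTok, h1.1, h1.2, h2] using ih hrest
    · rw [List.filter_cons_of_neg (by simpa using h1)]
      simp only [Bool.and_eq_true, Bool.not_eq_true', not_and_or, Bool.not_eq_false,
        PySem.Str.startswith_eq, PySem.Str.endswith_eq,
          show "(".toList = ['('] from rfl, show ")".toList = [')'] from rfl,
          show "[".toList = ['['] from rfl, show "]".toList = [']'] from rfl] at h1
      rcases h1 with h1 | h1 <;>
        simpa [scanTok, h1] using ih hrest

-- singleton startswith/endswith as head/last tests
lemma startswith_singleton (l : List Char) (c : Char) :
    PySem.Chars.startswith l [c] = true ↔ l.head? = some c := by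
  rw [PySem.Chars.startswith_iff]
  constructor
  · rintro ⟨t, rfl⟩; rfl
  · intro h
    cases l with
    | nil => simp at h
    | cons a t => simp at h; subst h; exact ⟨t, rfl⟩

lemma endswith_singleton (l : List Char) (c : Char) :
    PySem.Chars.endswith l [c] = true ↔ l.getLast? = some c := by
  rw [PySem.Chars.endswith_iff]
  constructor
  · rintro ⟨t, rfl⟩; simp
  · intro h
    rcases List.getLast?_eq_some_iff.mp h with ⟨t, rfl⟩
    exact ⟨t, rfl⟩

-- per-token agreement: on a nonempty token, A's fused bracket/`p` decision is isResB
lemma tok_step (t : List Char) (hne : t ≠ []) (k : Option String) :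
    (if PySem.Chars.startswith t ['('] || PySem.Chars.endswith t [')'] ||
        PySem.Chars.startswith t ['['] || PySem.Chars.endswith t [']'] then k
     else if PySem.Chars.endswith t ['p'] then some (String.ofList t) else k)
    = if isResB t then some (String.ofList t) else k := by
  obtain ⟨b, hb⟩ := Option.isSome_iff_exists.mp (List.getLast?_isSome.mpr hne)
  obtain ⟨a, t', rfl⟩ : ∃ a t', t = a :: t' := by
    cases t with
    | nil => exact absurd rfl hne
    | cons a t' => exact ⟨a, t', rfl⟩
  have hsw : ∀ c, PySem.Chars.startswith (a :: t') [c] = (a == c) := by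
    intro c
    rw [Bool.eq_iff_iff, startswith_singleton]
    simp
  have hew : ∀ c, PySem.Chars.endswith (a :: t') [c] = (b == c) := by
    intro c
    rw [Bool.eq_iff_iff, endswith_singleton, hb]
    simp
  have hres : isResB (a :: t') = (!(a == '(' || a == '[') && (b == 'p')) := by
    unfold isResB
    rw [List.getLastD_eq_getLast?, hb]
    simp
  rw [hsw, hsw, hew, hew, hew, hres]
  by_cases hp : b = 'p'
  · subst hp
    cases h1 : (a == '(') <;> cases h2 : (a == '[') <;> simp [h1, h2]
  · have : (b == 'p') = false := by simp [hp]
    rw [this]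
    split <;> simp

-- scanTok unfolded on a char-list token
lemma scanTok_cons (t : List Char) (ts : List String) :
    scanTok (String.ofList t :: ts) =
    (if PySem.Chars.startswith t ['('] || PySem.Chars.endswith t [')'] ||
        PySem.Chars.startswith t ['['] || PySem.Chars.endswith t [']'] then scanTok ts
     else if PySem.Chars.endswith t ['p'] then some (String.ofList t) else scanTok ts) := by
  simp only [scanTok, PySem.Str.startswith_eq, PySem.Str.endswith_eq, String.toList_ofList,
    show "(".toList = ['('] from rfl, show ")".toList = [')'] from rfl,
    show "[".toList = ['['] from rfl, show "]".toList = [']'] from rfl,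
    show "p".toList = ['p'] from rfl]

-- flush-accumulator law for split₀.go
lemma split₀_go_append (s cur : List Char) (acc : List (List Char)) :
    PySem.Chars.split₀.go s cur acc = acc.reverse ++ PySem.Chars.split₀.go s cur [] := by
  induction s generalizing cur acc with
  | nil =>
    simp only [PySem.Chars.split₀.go]
    split <;> simp
  | cons c rest ih =>
    simp only [PySem.Chars.split₀.go]
    split
    · split
      · exact ih [] acc
      · rw [ih [] (cur.reverse :: acc), ih [] [cur.reverse]]; simp
    · exact ih (c :: cur) acc

-- token-level scan over split₀'s output = B's character-level scan (cur = pending buffer)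
lemma scan_eq_chars (s cur : List Char) :
    scanTok ((PySem.Chars.split₀.go s cur.reverse []).map String.ofList) = scanCharsB s cur := by
  induction s generalizing cur with
  | nil =>
    simp only [PySem.Chars.split₀.go, scanCharsB]
    by_cases hc : cur = []
    · subst hc; simp [scanTok, isResB]
    · rw [if_neg (by simpa using hc)]
      simp only [List.reverse_reverse, List.reverse_cons, List.reverse_nil, List.nil_append,
        List.map_cons, List.map_nil]
      rw [scanTok_cons, tok_step cur hc]
      rfl
  | cons c rest ih =>
    simp only [PySem.Chars.split₀.go, scanCharsB]
    have ihnil : scanTok ((PySem.Chars.split₀.go rest [] []).map String.ofList) = scanCharsB rest [] := by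
      have := ih []
      simpa using this
    by_cases hsp : PySem.Chars.isspace c = true
    · rw [if_pos hsp, if_pos hsp]
      by_cases hc : cur = []
      · subst hc
        rw [if_pos (by simp)]
        simpa [isResB] using ihnil
      · rw [if_neg (by simpa using hc)]
        rw [split₀_go_append rest [] [cur.reverse.reverse]]
        simp only [List.reverse_reverse, List.reverse_cons, List.reverse_nil, List.nil_append,
          List.map_append, List.map_cons, List.map_nil, List.singleton_append]
        rw [scanTok_cons, tok_step cur hc, ihnil]
    · rw [if_neg hsp, if_neg hsp]
      have : c :: cur.reverse = (cur ++ [c]).reverse := by simp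
      rw [this]
      exact ih (cur ++ [c])

-- ===== VERDICT =====
theorem find_res_spec : Claim_equal_find_res := by
  intro line _
  unfold Spec_find_res find_res find_res_alt
  have h1 : ∀ t ∈ PySem.Str.split₀ line, PySem.Str.rstrip t = t := by
    intro t ht
    simp only [PySem.Str.split₀, List.mem_map] at ht
    obtain ⟨cs, hcs, rfl⟩ := ht
    refine str_rstrip_fixed _ ?_
    intro c hc
    exact split₀_no_space line.toList cs hcs c (by simpa using hc)
  rw [passes_eq_scan _ h1]
  have h2 : PySem.Str.split₀ line
      = (PySem.Chars.split₀.go line.toList ([] : List Char).reverse []).map String.ofList := by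
    simp [PySem.Str.split₀, PySem.Chars.split₀]
  rw [h2, scan_eq_chars line.toList []]
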